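-- pv_equiv track=rewrite | github.com/toku463ne/cld_trade_advisor | scripts/extract_sign_docs.py | _comment_block_to_md
-- ===== SOURCE A (Python) =====
-- def _comment_block_to_md(block: list[str]) -> str:
--     """The `# ── Benchmark ──`-style comment block → markdown.
--
--     We keep the original formatting inside a fenced ``` block so the shell
--     commands and ASCII tables remain legible.
--     """
--     if not block:
--         return ""
--     cleaned = []
--     for line in block:
--         # Drop the leading "# " or "#"
--         if line.startswith("# "):
--             cleaned.append(line[2:])
--         elif line == "#":
--             cleaned.append("")
--         else:
--             cleaned.append(line)
--     body = "\n".join(cleaned).strip("\n")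
--     return "## Benchmark notes\n\n```\n" + body + "\n```\n"
-- ===== SOURCE B (Python) =====
-- def _comment_block_to_md(block: list[str]) -> str:
--     """Single forward pass with list-level trimming: leading blank/newline-only
--     cleaned lines are consumed inline (lstrip of the first kept line), trailing
--     ones are popped afterwards, so the joined body needs no string-level strip."""
--     if not block:
--         return ""
--     parts = []
--     for line in block:
--         if line.startswith("# "):
--             line = line[2:]
--         elif line == "#":
--             line = ""
--         if parts:
--             parts.append(line)
--         else:
--             line = line.lstrip("\n")
--             if line:
--                 parts.append(line)
--     # trim the back of the body at the list level
--     while parts: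
--         s = parts[-1].rstrip("\n")
--         if s:
--             parts[-1] = s
--             break
--         parts.pop()
--     body = "\n".join(parts)
--     return "## Benchmark notes\n\n```\n" + body + "\n```\n"
-- ===== Notes on version B (the rewrite author's own statement) =====
-- stated objective: alternative
-- what changed: Replaces A's clean-list + join + string-level strip('\n') pipeline by a single forward pass that trims leading blank lines inline and pops trailing ones at the list level, joining once with no strip.
import Mathlib
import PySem

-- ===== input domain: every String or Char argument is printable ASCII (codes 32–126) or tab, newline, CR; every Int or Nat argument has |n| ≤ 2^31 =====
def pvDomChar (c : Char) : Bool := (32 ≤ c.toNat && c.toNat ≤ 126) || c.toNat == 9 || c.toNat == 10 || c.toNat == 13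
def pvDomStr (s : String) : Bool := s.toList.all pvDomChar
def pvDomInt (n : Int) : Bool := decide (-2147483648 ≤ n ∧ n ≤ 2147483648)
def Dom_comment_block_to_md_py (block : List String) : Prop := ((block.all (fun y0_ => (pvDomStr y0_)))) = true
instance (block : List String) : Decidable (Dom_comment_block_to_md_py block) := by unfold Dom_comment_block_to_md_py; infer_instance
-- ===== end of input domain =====

-- B builds the same markdown in one forward pass with list-level trimming (inline
-- lstrip of the first kept line, pop/rstrip of trailing blank lines) instead of
-- A's clean-list + join + string-level strip; alternative structure, same cost.


-- ===== PORT A =====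
def comment_block_to_md_py (block : List String) : String :=
  if block = [] then ""
  else
    let cleaned := block.foldl (fun acc line =>
      if PySem.Str.startswith line "# " then acc ++ [PySem.Str.slice line (some 2) none]
      else if line = "#" then acc ++ [""]
      else acc ++ [line]) []
    let body := PySem.Str.stripChars (PySem.Str.join "\n" cleaned) "\n"
    "## Benchmark notes\n\n```\n" ++ body ++ "\n```\n"

-- ===== PORT B =====
-- exact port of str.lstrip("\n") / str.rstrip("\n")
def pvLstripNL (s : String) : String := String.ofList (s.toList.dropWhile (· == '\n'))
def pvRstripNL (s : String) : String := String.ofList ((s.toList.reverse.dropWhile (· == '\n')).reverse)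
-- the `while parts: s = parts[-1].rstrip("\n"); …; parts.pop()` loop, run on the reversed list
def pvTrimBackRev : List String → List String
  | [] => []
  | s :: rest => if pvRstripNL s = "" then pvTrimBackRev rest else pvRstripNL s :: rest

def comment_block_to_md_py_alt (block : List String) : String :=
  if block = [] then ""
  else
    let parts := block.foldl (fun parts line =>
      let line := if PySem.Str.startswith line "# " then PySem.Str.slice line (some 2) none
                  else if line = "#" then "" else line
      if parts ≠ [] then parts ++ [line]
      else
        let line := pvLstripNL line
        if line ≠ "" then parts ++ [line] else parts) []
    let body := PySem.Str.join "\n" (pvTrimBackRev parts.reverse).reverse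
    "## Benchmark notes\n\n```\n" ++ body ++ "\n```\n"

-- ===== PRECONDITION & SPEC =====
def Spec_comment_block_to_md_py (block : List String) (out : String) : Prop := out = comment_block_to_md_py_alt block
instance (block : List String) (out : String) : Decidable (Spec_comment_block_to_md_py block out) := by unfold Spec_comment_block_to_md_py; infer_instance

-- ===== CLAIM (what is proved, stated in full; the proofs are below) =====
def Claim_equal_comment_block_to_md_py : Prop := ∀ (block : List String), Dom_comment_block_to_md_py block → Spec_comment_block_to_md_py block (comment_block_to_md_py block)

-- ===== LEMMAS AND PROOFS =====

-- the shared per-line cleaning step, named for the proofs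
def pvClean (line : String) : String :=
  if PySem.Str.startswith line "# " then PySem.Str.slice line (some 2) none
  else if line = "#" then "" else line

-- char-level trims
def pvDropNL (s : List Char) : List Char := s.dropWhile (· == '\n')
def pvTrimF : List (List Char) → List (List Char)
  | [] => []
  | x :: r => if pvDropNL x = [] then pvTrimF r else pvDropNL x :: r
def pvRstripC (s : List Char) : List Char := (pvDropNL s.reverse).reverse
def pvTrimR : List (List Char) → List (List Char)
  | [] => []
  | x :: r => if pvRstripC x = [] then pvTrimR r else pvRstripC x :: r

-- String-level front trim matching B's fold
def pvTrimFs : List String → List String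
  | [] => []
  | x :: r => if pvLstripNL x = "" then pvTrimFs r else pvLstripNL x :: r

theorem pvOfList_eq_empty_iff (l : List Char) : String.ofList l = "" ↔ l = [] := by
  constructor
  · intro h; have := congrArg String.toList h; simpa using this
  · intro h; simp [h]

theorem pvLstrip_toList (s : String) : (pvLstripNL s).toList = pvDropNL s.toList := by
  simp [pvLstripNL, pvDropNL]

theorem pvRstrip_toList (s : String) : (pvRstripNL s).toList = pvRstripC s.toList := by
  simp [pvRstripNL, pvRstripC, pvDropNL]

theorem pvLstrip_eq_empty (s : String) : pvLstripNL s = "" ↔ pvDropNL s.toList = [] :=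
  (pvOfList_eq_empty_iff _)

theorem pvRstrip_eq_empty (s : String) : pvRstripNL s = "" ↔ pvRstripC s.toList = [] :=
  (pvOfList_eq_empty_iff _)

theorem pvFoldA (block : List String) (acc : List String) :
    block.foldl (fun acc line =>
      if PySem.Str.startswith line "# " then acc ++ [PySem.Str.slice line (some 2) none]
      else if line = "#" then acc ++ [""]
      else acc ++ [line]) acc = acc ++ block.map pvClean := by
  induction block generalizing acc with
  | nil => simp
  | cons x r ih =>
    simp only [List.foldl_cons, ih, List.map_cons]
    unfold pvClean
    split_ifs <;> simp

theorem pvFoldB_ne (block : List String) (acc : List String) (h : acc ≠ []) :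
    block.foldl (fun parts line =>
      let line := if PySem.Str.startswith line "# " then PySem.Str.slice line (some 2) none
                  else if line = "#" then "" else line
      if parts ≠ [] then parts ++ [line]
      else
        let line := pvLstripNL line
        if line ≠ "" then parts ++ [line] else parts) acc = acc ++ block.map pvClean := by
  induction block generalizing acc with
  | nil => simp
  | cons x r ih =>
    simp only [List.foldl_cons, List.map_cons]
    rw [if_pos h, ih (acc ++ [_]) (by simp)]
    simp [pvClean]

theorem pvFoldB (block : List String) :
    block.foldl (fun parts line =>
      let line := if PySem.Str.startswith line "# " then PySem.Str.slice line (some 2) none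
                  else if line = "#" then "" else line
      if parts ≠ [] then parts ++ [line]
      else
        let line := pvLstripNL line
        if line ≠ "" then parts ++ [line] else parts) [] = pvTrimFs (block.map pvClean) := by
  induction block with
  | nil => simp [pvTrimFs]
  | cons x r ih =>
    simp only [List.foldl_cons, List.map_cons]
    rw [pvTrimFs]
    by_cases h : pvLstripNL (pvClean x) = ""
    · rw [if_pos h, if_neg (by simp), ← pvClean]
      rw [if_neg (by simpa using h)]
      exact ih
    · rw [if_neg h, if_neg (by simp), ← pvClean]
      rw [if_pos (by simpa using h)]
      simpa using pvFoldB_ne r [pvLstripNL (pvClean x)] (by simp)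

theorem pvTrimFs_toList (L : List String) :
    (pvTrimFs L).map String.toList = pvTrimF (L.map String.toList) := by
  induction L with
  | nil => simp [pvTrimFs, pvTrimF]
  | cons x r ih =>
    rw [List.map_cons, pvTrimFs, pvTrimF]
    by_cases h : pvLstripNL x = ""
    · rw [if_pos h, if_pos ((pvLstrip_eq_empty x).mp h), ih]
    · rw [if_neg h, if_neg (fun hc => h ((pvLstrip_eq_empty x).mpr hc))]
      rw [List.map_cons, pvLstrip_toList]

theorem pvTrimBackRev_toList (L : List String) :
    (pvTrimBackRev L).map String.toList = pvTrimR (L.map String.toList) := by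
  induction L with
  | nil => simp [pvTrimBackRev, pvTrimR]
  | cons x r ih =>
    rw [List.map_cons, pvTrimBackRev, pvTrimR]
    by_cases h : pvRstripNL x = ""
    · rw [if_pos h, if_pos ((pvRstrip_eq_empty x).mp h), ih]
    · rw [if_neg h, if_neg (fun hc => h ((pvRstrip_eq_empty x).mpr hc))]
      rw [List.map_cons, pvRstrip_toList]

-- pvTrimR is pvTrimF through reversal of each element
theorem pvTrimR_eq (K : List (List Char)) :
    pvTrimR K = (pvTrimF (K.map List.reverse)).map List.reverse := by
  induction K with
  | nil => simp [pvTrimR, pvTrimF]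
  | cons x r ih =>
    rw [List.map_cons, pvTrimR, pvTrimF]
    by_cases h : pvDropNL x.reverse = []
    · rw [if_pos (by simp [pvRstripC, h]), if_pos h, ih]
    · rw [if_neg (by simpa [pvRstripC] using h), if_neg h]
      simp [pvRstripC]

theorem pvIntercalate_cons (x : List Char) (r : List (List Char)) (hr : r ≠ []) :
    List.intercalate ['\n'] (x :: r) = x ++ '\n' :: List.intercalate ['\n'] r := by
  obtain ⟨y, r', rfl⟩ := List.exists_cons_of_ne_nil hr
  simp [List.intercalate, List.intersperse]

theorem pvIntercalate_concat (A : List (List Char)) (b : List Char) (hA : A ≠ []) :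
    List.intercalate ['\n'] (A ++ [b]) = List.intercalate ['\n'] A ++ '\n' :: b := by
  induction A with
  | nil => exact absurd rfl hA
  | cons a A' ih =>
    by_cases h : A' = []
    · subst h; simp [List.intercalate, List.intersperse]
    · rw [List.cons_append, pvIntercalate_cons a (A' ++ [b]) (by simp), ih h,
        pvIntercalate_cons a A' h]
      simp

-- lstrip distributes over the newline-join as the list-level front trim
theorem pvL1 (L : List (List Char)) :
    pvDropNL (List.intercalate ['\n'] L) = List.intercalate ['\n'] (pvTrimF L) := by
  induction L with
  | nil => simp [pvDropNL, pvTrimF, List.intercalate]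
  | cons x r ih =>
    rw [pvTrimF]
    by_cases hr : r = []
    · subst hr
      by_cases h : pvDropNL x = []
      · rw [if_pos h]; simpa [List.intercalate, List.intersperse] using h
      · rw [if_neg h]; simp [List.intercalate, List.intersperse, pvDropNL]
    · rw [pvIntercalate_cons x r hr]
      by_cases h : pvDropNL x = []
      · rw [if_pos h, ← ih]
        simp only [pvDropNL] at h ⊢
        rw [List.dropWhile_append, h]
        simp
      · rw [if_neg h]
        rw [pvIntercalate_cons (pvDropNL x) r hr]
        simp only [pvDropNL] at h ⊢
        rw [List.dropWhile_append]
        simp [h]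

-- reversing the newline-join reverses the list and each element
theorem pvL2 (L : List (List Char)) :
    (List.intercalate ['\n'] L).reverse = List.intercalate ['\n'] ((L.map List.reverse).reverse) := by
  induction L with
  | nil => simp [List.intercalate]
  | cons x r ih =>
    by_cases hr : r = []
    · subst hr; simp [List.intercalate, List.intersperse]
    · rw [pvIntercalate_cons x r hr, List.map_cons, List.reverse_cons,
        pvIntercalate_concat _ x.reverse (by simp [hr]), ← ih,
        List.reverse_append, List.reverse_cons, List.append_assoc]
      simp only [List.cons_append, List.nil_append]

-- the char-level core: strip("\n") of the join = join of the list-level trims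
theorem pvCore (M : List (List Char)) :
    PySem.Chars.stripChars (List.intercalate ['\n'] M) ['\n'] =
    List.intercalate ['\n'] ((pvTrimR (pvTrimF M).reverse).reverse) := by
  have hp : (fun c => List.contains ['\n'] c) = (fun c : Char => c == '\n') := by
    funext c; simp only [List.contains_eq_mem, List.mem_singleton]
    rw [Bool.eq_iff_iff]; simp
  have hdw : ∀ s : List Char, List.dropWhile (fun c => List.contains ['\n'] c) s = pvDropNL s := by
    intro s; rw [hp]; rfl
  show (List.dropWhile _ (List.dropWhile _ (List.intercalate ['\n'] M)).reverse).reverse = _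
  rw [hdw, hdw, pvL1, pvL2, pvL1, pvL2, pvTrimR_eq]
  rw [List.map_reverse]

-- the String-level body equality
theorem pvBody (cl : List String) :
    PySem.Str.stripChars (PySem.Str.join "\n" cl) "\n" =
    PySem.Str.join "\n" (pvTrimBackRev (pvTrimFs cl).reverse).reverse := by
  rw [PySem.Str.stripChars, PySem.Str.join]
  congr 1
  simp only [String.toList_ofList]
  rw [show "\n".toList = ['\n'] from rfl, PySem.Chars.join, PySem.Chars.join, pvCore]
  congr 1
  rw [List.map_reverse, pvTrimBackRev_toList, List.map_reverse, pvTrimFs_toList]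

-- ===== VERDICT (by name: the statement is the Claim_ definition above) =====
theorem comment_block_to_md_py_spec : Claim_equal_comment_block_to_md_py := by
  intro block _
  show comment_block_to_md_py block = comment_block_to_md_py_alt block
  unfold comment_block_to_md_py comment_block_to_md_py_alt
  by_cases hb : block = []
  · simp [hb]
  · rw [if_neg hb, if_neg hb]
    simp only [pvFoldA, pvFoldB, List.nil_append, pvBody]
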